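-- pv_equiv track=rewrite | github.com/PooranaSelvan/zoho-zestober-2024 | day26.py | is_fully_covered
-- ===== SOURCE A (Python) =====
-- def is_fully_covered(grid):
--     grid_list = list(grid)
--     n = len(grid_list)
--
--     for i in range(n):
--         if grid_list[i] == 'C':
--             grid_list[i] = '#'
--             if (i > 0 and grid_list[i - 1] == '.') or (i < n - 1 and grid_list[i + 1] == '.'):
--                 if i > 0 and grid_list[i - 1] == '.':
--                     grid_list[i - 1] = '#'
--                 if i < n - 1 and grid_list[i + 1] == '.':
--                     grid_list[i + 1] = '#'
--
--     return '.' not in grid_list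
-- ===== SOURCE B (Python) =====
-- def is_fully_covered(grid):
--     # Single read-only pass: every '.' must have an original 'C' neighbor.
--     n = len(grid)
--     for i in range(n):
--         if grid[i] == '.':
--             if not ((i > 0 and grid[i - 1] == 'C') or (i + 1 < n and grid[i + 1] == 'C')):
--                 return False
--     return True
-- ===== Notes on version B (the rewrite author's own statement) =====
-- stated objective: simpler
-- what changed: B drops A's mutable marking buffer entirely: instead of painting '#' over covered cells and scanning for leftover '.', it makes one read-only pass checking that each '.' has an adjacent 'C' in the original string.
import Mathlib
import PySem

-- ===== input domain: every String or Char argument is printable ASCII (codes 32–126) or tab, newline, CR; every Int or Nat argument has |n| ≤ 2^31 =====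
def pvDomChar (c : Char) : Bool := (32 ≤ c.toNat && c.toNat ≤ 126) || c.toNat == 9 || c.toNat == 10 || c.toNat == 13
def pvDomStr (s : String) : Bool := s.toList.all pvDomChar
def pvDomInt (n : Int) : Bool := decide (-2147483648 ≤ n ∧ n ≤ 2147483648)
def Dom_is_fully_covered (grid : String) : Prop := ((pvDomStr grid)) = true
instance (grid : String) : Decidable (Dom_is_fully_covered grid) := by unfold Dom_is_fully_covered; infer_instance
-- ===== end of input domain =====

-- B replaces A's mutable '#'-marking buffer by one read-only pass: each '.' must have an adjacent original 'C' (simpler, no mutation).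

-- ===== PORT A =====
-- one iteration of A's for-loop body (state = the mutable grid_list)
def paintStep (n : Nat) (l : List Char) (i : Nat) : List Char :=
  if l.getD i ' ' = 'C' then
    let l1 := l.set i '#'
    if (0 < i ∧ l1.getD (i - 1) ' ' = '.') ∨ (i < n - 1 ∧ l1.getD (i + 1) ' ' = '.') then
      let l2 := if 0 < i ∧ l1.getD (i - 1) ' ' = '.' then l1.set (i - 1) '#' else l1
      let l3 := if i < n - 1 ∧ l2.getD (i + 1) ' ' = '.' then l2.set (i + 1) '#' else l2
      l3
    else l1
  else l

def is_fully_covered (grid : String) : Bool :=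
  let grid_list := grid.toList
  let n := grid_list.length
  let final := (List.range n).foldl (paintStep n) grid_list
  !(final.contains '.')

-- ===== PORT B =====
def is_fully_covered_alt (grid : String) : Bool :=
  let cs := grid.toList
  let n := cs.length
  (List.range n).all (fun i =>
    if cs.getD i ' ' = '.' then
      (decide (0 < i) && (cs.getD (i - 1) ' ' == 'C')) || (decide (i + 1 < n) && (cs.getD (i + 1) ' ' == 'C'))
    else true)

-- ===== PRECONDITION & SPEC =====
def Spec_is_fully_covered (grid : String) (out : Bool) : Prop := out = is_fully_covered_alt grid
instance (grid : String) (out : Bool) : Decidable (Spec_is_fully_covered grid out) := by unfold Spec_is_fully_covered; infer_instance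

-- ===== CLAIM (what is proved, stated in full; the proofs are below) =====
def Claim_equal_is_fully_covered : Prop := ∀ (grid : String), Dom_is_fully_covered grid → Spec_is_fully_covered grid (is_fully_covered grid)

-- ===== LEMMAS AND PROOFS =====

-- the value cell j holds after the first i iterations of A's loop
def mark (o : List Char) (i j : Nat) : Char :=
  if (o.getD j ' ' = 'C' ∧ j < i) ∨
     (o.getD j ' ' = '.' ∧ ((0 < j ∧ o.getD (j - 1) ' ' = 'C' ∧ j - 1 < i) ∨
                            (o.getD (j + 1) ' ' = 'C' ∧ j + 1 < i))) then '#'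
  else o.getD j ' '

theorem getD_set_char (l : List Char) (k j : Nat) (c : Char) :
    (l.set k c).getD j ' ' = if k = j ∧ k < l.length then c else l.getD j ' ' := by
  by_cases hkj : k = j
  · subst hkj
    by_cases hkl : k < l.length
    · simp [List.getD_eq_getElem?_getD, hkl]
    · have : l[k]? = none := List.getElem?_eq_none (by omega)
      simp [List.getD_eq_getElem?_getD, hkl]
  · simp [List.getD_eq_getElem?_getD, hkj]

theorem mark_zero (o : List Char) (j : Nat) : mark o 0 j = o.getD j ' ' := by
  unfold mark; split_ifs with h
  · rcases h with ⟨_, h⟩ | ⟨_, ⟨_, _, h⟩ | ⟨_, h⟩⟩ <;> omega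
  · rfl

theorem getD_lt {o : List Char} {k : Nat} {c : Char} (h : o.getD k ' ' = c) (hc : c ≠ ' ') :
    k < o.length := by
  by_contra hk
  rw [List.getD_eq_getElem?_getD, List.getElem?_eq_none (by omega)] at h
  exact hc h.symm

theorem mark_at_right (o : List Char) (i : Nat) : mark o i (i + 1) = o.getD (i + 1) ' ' := by
  unfold mark
  split_ifs with h
  · exfalso
    rcases h with ⟨_, h2⟩ | ⟨_, ⟨_, _, h2⟩ | ⟨_, h2⟩⟩ <;> omega
  · rfl

theorem mark_succ_self (o : List Char) (i : Nat) (hC : o.getD i ' ' = 'C') :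
    mark o (i + 1) i = '#' := by
  unfold mark
  rw [if_pos (Or.inl ⟨hC, by omega⟩)]

theorem mark_succ_right (o : List Char) (i : Nat) (hC : o.getD i ' ' = 'C') :
    mark o (i + 1) (i + 1) = if o.getD (i + 1) ' ' = '.' then '#' else o.getD (i + 1) ' ' := by
  unfold mark
  by_cases hd : o.getD (i + 1) ' ' = '.'
  · rw [if_pos, if_pos hd]
    exact Or.inr ⟨hd, Or.inl ⟨by omega, by simpa using hC, by omega⟩⟩
  · rw [if_neg, if_neg hd]
    rintro (⟨hc, hlt⟩ | ⟨hdot, _⟩)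
    · omega
    · exact hd hdot

theorem mark_succ_left (o : List Char) (i : Nat) (h0 : 0 < i) (hC : o.getD i ' ' = 'C') :
    mark o (i + 1) (i - 1) = if mark o i (i - 1) = '.' then '#' else mark o i (i - 1) := by
  by_cases hm : mark o i (i - 1) = '.'
  · rw [if_pos hm]
    have hdot : o.getD (i - 1) ' ' = '.' := by
      unfold mark at hm
      split_ifs at hm
      · exact absurd hm (by decide)
      · exact hm
    unfold mark
    rw [if_pos (Or.inr ⟨hdot, Or.inr ⟨by rw [Nat.sub_add_cancel h0]; exact hC, by omega⟩⟩)]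
  · rw [if_neg hm]
    unfold mark at hm ⊢
    split_ifs at hm with hc
    · rw [if_pos hc]
      rcases hc with ⟨hc1, _⟩ | ⟨hd, ⟨hx, hy, _⟩ | ⟨hc1, _⟩⟩
      · rw [if_pos (Or.inl ⟨hc1, by omega⟩)]
      · rw [if_pos (Or.inr ⟨hd, Or.inl ⟨hx, hy, by omega⟩⟩)]
      · rw [if_pos (Or.inr ⟨hd, Or.inr ⟨hc1, by omega⟩⟩)]
    · rw [if_neg hc, if_neg]
      rintro (⟨hc1, _⟩ | ⟨hd, _⟩)
      · exact hc (Or.inl ⟨hc1, by omega⟩)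
      · exact hm hd

theorem mark_stable (o : List Char) (i j : Nat) (h1 : j ≠ i) (h2 : j ≠ i + 1) (h3 : j + 1 ≠ i) :
    mark o (i + 1) j = mark o i j := by
  unfold mark
  split_ifs with ha hb hb <;> try rfl
  · exfalso
    rcases ha with ⟨hc, hlt⟩ | ⟨hdot, ⟨hx, hy, hlt⟩ | ⟨hc, hlt⟩⟩
    · exact hb (Or.inl ⟨hc, by omega⟩)
    · exact hb (Or.inr ⟨hdot, Or.inl ⟨hx, hy, by omega⟩⟩)
    · exact hb (Or.inr ⟨hdot, Or.inr ⟨hc, by omega⟩⟩)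
  · exfalso
    rcases hb with ⟨hc, hlt⟩ | ⟨hdot, ⟨hx, hy, hlt⟩ | ⟨hc, hlt⟩⟩
    · exact ha (Or.inl ⟨hc, by omega⟩)
    · exact ha (Or.inr ⟨hdot, Or.inl ⟨hx, hy, by omega⟩⟩)
    · exact ha (Or.inr ⟨hdot, Or.inr ⟨hc, by omega⟩⟩)

theorem mark_stable_ne (o : List Char) (i j : Nat) (hC : o.getD i ' ' ≠ 'C') :
    mark o (i + 1) j = mark o i j := by
  unfold mark
  split_ifs with ha hb hb <;> try rfl
  · exfalso
    rcases ha with ⟨hc, hlt⟩ | ⟨hdot, ⟨hx, hy, hlt⟩ | ⟨hc, hlt⟩⟩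
    · rcases Nat.lt_or_ge j i with h | h
      · exact hb (Or.inl ⟨hc, h⟩)
      · have : j = i := by omega
        exact hC (this ▸ hc)
    · rcases Nat.lt_or_ge (j - 1) i with h | h
      · exact hb (Or.inr ⟨hdot, Or.inl ⟨hx, hy, h⟩⟩)
      · have : j - 1 = i := by omega
        exact hC (this ▸ hy)
    · rcases Nat.lt_or_ge (j + 1) i with h | h
      · exact hb (Or.inr ⟨hdot, Or.inr ⟨hc, h⟩⟩)
      · have : j + 1 = i := by omega
        exact hC (this ▸ hc)
  · exfalso
    rcases hb with ⟨hc, hlt⟩ | ⟨hdot, ⟨hx, hy, hlt⟩ | ⟨hc, hlt⟩⟩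
    · exact ha (Or.inl ⟨hc, by omega⟩)
    · exact ha (Or.inr ⟨hdot, Or.inl ⟨hx, hy, by omega⟩⟩)
    · exact ha (Or.inr ⟨hdot, Or.inr ⟨hc, by omega⟩⟩)

theorem step_mark (o : List Char) (i : Nat) (hi : i < o.length) (l : List Char)
    (hlen : l.length = o.length) (h : ∀ j, l.getD j ' ' = mark o i j) :
    (paintStep o.length l i).length = o.length ∧
    ∀ j, (paintStep o.length l i).getD j ' ' = mark o (i + 1) j := by
  constructor
  · unfold paintStep
    simp only [apply_ite List.length, List.length_set, ite_self, hlen]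
  have hguard : (l.getD i ' ' = 'C') ↔ (o.getD i ' ' = 'C') := by
    rw [h i]
    unfold mark
    split_ifs with hcond
    · constructor
      · intro hx; exact absurd hx (by decide)
      · intro hx
        rcases hcond with ⟨_, h2⟩ | ⟨hdot, _⟩
        · omega
        · rw [hx] at hdot; exact absurd hdot (by decide)
    · exact Iff.rfl
  by_cases hC : o.getD i ' ' = 'C'
  · -- the C branch fires
    intro j
    have hil : i < l.length := by omega
    have hl1 : ∀ k, (l.set i '#').getD k ' ' = if i = k then '#' else mark o i k := by
      intro k
      rw [getD_set_char]
      by_cases hik : i = k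
      · rw [if_pos ⟨hik, hil⟩, if_pos hik]
      · rw [if_neg (fun hx => hik hx.1), if_neg hik]
        exact h k
    have hl1len : (l.set i '#').length = o.length := by simp [hlen]
    have hdL : 0 < i → (l.set i '#').getD (i - 1) ' ' = mark o i (i - 1) := by
      intro h0; rw [hl1]; rw [if_neg (by omega)]
    have hdR : (l.set i '#').getD (i + 1) ' ' = o.getD (i + 1) ' ' := by
      rw [hl1, if_neg (by omega), mark_at_right]
    unfold paintStep
    rw [if_pos (hguard.2 hC)]
    simp only []
    by_cases hC1 : 0 < i ∧ (l.set i '#').getD (i - 1) ' ' = '.'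
    · have hQ1 : mark o i (i - 1) = '.' := by rw [← hdL hC1.1]; exact hC1.2
      have h0 : 0 < i := hC1.1
      have hset1 : ∀ k, ((l.set i '#').set (i - 1) '#').getD k ' ' =
          if i - 1 = k then '#' else (l.set i '#').getD k ' ' := by
        intro k
        rw [getD_set_char]
        by_cases he : i - 1 = k
        · rw [if_pos ⟨he, by rw [hl1len]; omega⟩, if_pos he]
        · rw [if_neg (fun hx => he hx.1), if_neg he]
      have hR2 : ((l.set i '#').set (i - 1) '#').getD (i + 1) ' ' = o.getD (i + 1) ' ' := by
        rw [hset1, if_neg (by omega), hdR]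
      rw [if_pos (Or.inl hC1), if_pos hC1]
      by_cases hC2 : i < o.length - 1 ∧ ((l.set i '#').set (i - 1) '#').getD (i + 1) ' ' = '.'
      · -- both neighbors painted
        have hQ2 : o.getD (i + 1) ' ' = '.' := by rw [← hR2]; exact hC2.2
        rw [if_pos hC2, getD_set_char]
        by_cases hj1 : j = i + 1
        · rw [if_pos ⟨hj1.symm, by simp [hl1len]; omega⟩, hj1, mark_succ_right o i hC, if_pos hQ2]
        · rw [if_neg (by intro hx; exact hj1 hx.1.symm), hset1]
          by_cases hj2 : j = i - 1
          · rw [if_pos hj2.symm, hj2, mark_succ_left o i h0 hC, if_pos hQ1]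
          · rw [if_neg (fun hx => hj2 hx.symm), hl1]
            by_cases hj3 : j = i
            · rw [if_pos hj3.symm, hj3, mark_succ_self o i hC]
            · rw [if_neg (fun hx => hj3 hx.symm), mark_stable o i j hj3 hj1 (by omega)]
      · -- only left painted
        have hQ2 : o.getD (i + 1) ' ' ≠ '.' := by
          intro hx
          have : i + 1 < o.length := getD_lt hx (by decide)
          exact hC2 ⟨by omega, by rw [hR2]; exact hx⟩
        rw [if_neg hC2, hset1]
        by_cases hj2 : j = i - 1
        · rw [if_pos hj2.symm, hj2, mark_succ_left o i h0 hC, if_pos hQ1]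
        · rw [if_neg (fun hx => hj2 hx.symm), hl1]
          by_cases hj3 : j = i
          · rw [if_pos hj3.symm, hj3, mark_succ_self o i hC]
          · rw [if_neg (fun hx => hj3 hx.symm)]
            by_cases hj1 : j = i + 1
            · rw [hj1, mark_at_right, mark_succ_right o i hC, if_neg hQ2]
            · rw [mark_stable o i j hj3 hj1 (by omega)]
    · -- left not painted
      have hQ1 : ¬ (0 < i ∧ mark o i (i - 1) = '.') := by
        intro ⟨h0, hx⟩
        exact hC1 ⟨h0, by rw [hdL h0]; exact hx⟩
      by_cases hC2 : i < o.length - 1 ∧ (l.set i '#').getD (i + 1) ' ' = '.'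
      · have hQ2 : o.getD (i + 1) ' ' = '.' := by rw [← hdR]; exact hC2.2
        rw [if_pos (Or.inr hC2), if_neg hC1, if_pos hC2, getD_set_char]
        by_cases hj1 : j = i + 1
        · rw [if_pos ⟨hj1.symm, by simp [hl1len]; omega⟩, hj1, mark_succ_right o i hC, if_pos hQ2]
        · rw [if_neg (by intro hx; exact hj1 hx.1.symm), hl1]
          by_cases hj3 : j = i
          · rw [if_pos hj3.symm, hj3, mark_succ_self o i hC]
          · rw [if_neg (fun hx => hj3 hx.symm)]
            by_cases hj2 : j = i - 1 ∧ 0 < i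
            · rw [hj2.1, mark_succ_left o i hj2.2 hC,
                 if_neg (fun hx => hQ1 ⟨hj2.2, by rw [← hj2.1] at hx ⊢; exact hx⟩)]
            · rw [mark_stable o i j hj3 hj1 (by omega)]
      · -- nothing painted besides i itself
        have hQ2 : o.getD (i + 1) ' ' ≠ '.' := by
          intro hx
          have : i + 1 < o.length := getD_lt hx (by decide)
          exact hC2 ⟨by omega, by rw [hdR]; exact hx⟩
        rw [if_neg (by rintro (h1 | h2); exacts [hC1 h1, hC2 h2]), hl1]
        by_cases hj3 : j = i
        · rw [if_pos hj3.symm, hj3, mark_succ_self o i hC]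
        · rw [if_neg (fun hx => hj3 hx.symm)]
          by_cases hj1 : j = i + 1
          · rw [hj1, mark_at_right, mark_succ_right o i hC, if_neg hQ2]
          · by_cases hj2 : j = i - 1 ∧ 0 < i
            · rw [hj2.1, mark_succ_left o i hj2.2 hC,
                 if_neg (fun hx => hQ1 ⟨hj2.2, hx⟩)]
            · rw [mark_stable o i j hj3 hj1 (by omega)]
  · -- not a C: nothing happens
    intro j
    unfold paintStep
    rw [if_neg (fun hx => hC (hguard.1 hx)), h j, mark_stable_ne o i j hC]

theorem paint_inv (o : List Char) (i : Nat) (hi : i ≤ o.length) :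
    ((List.range i).foldl (paintStep o.length) o).length = o.length ∧
    ∀ j, ((List.range i).foldl (paintStep o.length) o).getD j ' ' = mark o i j := by
  induction i with
  | zero => exact ⟨rfl, fun j => (mark_zero o j).symm⟩
  | succ i ih =>
    have ih' := ih (by omega)
    rw [List.range_succ, List.foldl_append]
    simpa using step_mark o i (by omega) _ ih'.1 ih'.2

theorem contains_iff (l : List Char) (c : Char) :
    l.contains c = true ↔ ∃ j < l.length, l.getD j ' ' = c := by
  rw [List.contains_iff_mem]
  constructor
  · intro hmem
    obtain ⟨j, hj, he⟩ := List.mem_iff_getElem.1 hmem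
    refine ⟨j, hj, ?_⟩
    rw [List.getD_eq_getElem?_getD, List.getElem?_eq_getElem hj, Option.getD_some, he]
  · rintro ⟨j, hj, he⟩
    rw [List.getD_eq_getElem?_getD, List.getElem?_eq_getElem hj, Option.getD_some] at he
    exact he ▸ List.getElem_mem hj

theorem final_char (o : List Char) (j : Nat) :
    mark o o.length j = '.' ↔ o.getD j ' ' = '.' ∧
      ¬ ((0 < j ∧ o.getD (j - 1) ' ' = 'C') ∨ (o.getD (j + 1) ' ' = 'C')) := by
  unfold mark
  split_ifs with h
  · constructor
    · intro hx; exact absurd hx (by decide)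
    · rintro ⟨hdot, hn⟩
      exfalso
      rcases h with ⟨hc, _⟩ | ⟨_, ⟨hx, hy, _⟩ | ⟨hc, _⟩⟩
      · rw [hdot] at hc; exact absurd hc (by decide)
      · exact hn (Or.inl ⟨hx, hy⟩)
      · exact hn (Or.inr hc)
  · constructor
    · intro hdot
      refine ⟨hdot, ?_⟩
      rintro (⟨hx, hy⟩ | hc)
      · have : j - 1 < o.length := getD_lt hy (by decide)
        exact h (Or.inr ⟨hdot, Or.inl ⟨hx, hy, this⟩⟩)
      · have : j + 1 < o.length := getD_lt hc (by decide)
        exact h (Or.inr ⟨hdot, Or.inr ⟨hc, this⟩⟩)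
    · exact fun hx => hx.1

-- ===== VERDICT (by name: the statement is the Claim_ definition above) =====
theorem is_fully_covered_spec : Claim_equal_is_fully_covered := by
  intro grid _
  show is_fully_covered grid = is_fully_covered_alt grid
  unfold is_fully_covered is_fully_covered_alt
  simp only []
  set o := grid.toList with ho
  have inv := paint_inv o o.length le_rfl
  have h1 : (((List.range o.length).foldl (paintStep o.length) o).contains '.') = true ↔
      ∃ j, j < o.length ∧ (o.getD j ' ' = '.' ∧
        ¬ ((0 < j ∧ o.getD (j - 1) ' ' = 'C') ∨ (o.getD (j + 1) ' ' = 'C'))) := by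
    rw [contains_iff]
    constructor
    · rintro ⟨j, hj, he⟩
      rw [inv.2 j] at he
      exact ⟨j, by rw [inv.1] at hj; exact hj, (final_char o j).1 he⟩
    · rintro ⟨j, hj, he⟩
      exact ⟨j, by rw [inv.1]; exact hj, by rw [inv.2 j]; exact (final_char o j).2 he⟩
  have h2 : ((List.range o.length).all fun i =>
        if o.getD i ' ' = '.' then
          (decide (0 < i) && (o.getD (i - 1) ' ' == 'C')) ||
          (decide (i + 1 < o.length) && (o.getD (i + 1) ' ' == 'C'))
        else true) = true ↔
      ∀ j, j < o.length → ¬ (o.getD j ' ' = '.' ∧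
        ¬ ((0 < j ∧ o.getD (j - 1) ' ' = 'C') ∨ (o.getD (j + 1) ' ' = 'C'))) := by
    rw [List.all_eq_true]
    constructor
    · intro hall j hj ⟨hdot, hn⟩
      have := hall j (List.mem_range.2 hj)
      rw [if_pos hdot] at this
      simp only [Bool.or_eq_true, Bool.and_eq_true, decide_eq_true_eq, beq_iff_eq] at this
      rcases this with ⟨hx, hy⟩ | ⟨_, hy⟩
      · exact hn (Or.inl ⟨hx, hy⟩)
      · exact hn (Or.inr hy)
    · intro hall j hj
      rw [List.mem_range] at hj
      by_cases hdot : o.getD j ' ' = '.'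
      · rw [if_pos hdot]
        simp only [Bool.or_eq_true, Bool.and_eq_true, decide_eq_true_eq, beq_iff_eq]
        have := hall j hj
        rw [not_and_not_right] at this
        rcases this hdot with ⟨hx, hy⟩ | hc
        · exact Or.inl ⟨hx, hy⟩
        · exact Or.inr ⟨getD_lt hc (by decide), hc⟩
      · rw [if_neg hdot]
    
  by_cases hc : (((List.range o.length).foldl (paintStep o.length) o).contains '.') = true
  · obtain ⟨j, hj, hprop⟩ := h1.1 hc
    have hna : ¬ (((List.range o.length).all fun i =>
        if o.getD i ' ' = '.' then
          (decide (0 < i) && (o.getD (i - 1) ' ' == 'C')) ||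
          (decide (i + 1 < o.length) && (o.getD (i + 1) ' ' == 'C'))
        else true) = true) := fun hall => (h2.1 hall j hj) hprop
    rw [hc, Bool.eq_false_iff.2 hna]
    rfl
  · have hall := h2.2 (fun j hj hcontra => hc (h1.2 ⟨j, hj, hcontra⟩))
    rw [Bool.eq_false_iff.2 hc, hall]
    rfl
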